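-- pv_equiv track=rewrite | github.com/epfl-ada/ada-2023-project-ndlmada | helpers.py | replace_return
-- ===== SOURCE A (Python) =====
-- def replace_return(path_list):
--     """ In a given path, it replaces the return character (<) by the corresponding article name.
--
--     parameter:
--         path_list: list of str
--             list of path from one article to another, where the '<' character represent a return.
--     return:
--         the modified path_list that repace the returns by the corresponding articles with a prefix (.).
--     """
--     count = 0
--     result_path_list = []
--     history = [] # To add the right path when multiples > not in sequence
--
--     l = len(path_list)
--     for i in range(l):
--
--         #Verify if the element of the list is an article or a return
--         if (path_list[i] == '<') & (count == 0):
--             #Take into account the case of a sequence of <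
--             while(( i + count < l) and (path_list[i + count] == '<')):
--                 count += 1
--
--             corresponding_return = history[-(count+1)]
--             history = history[:-(count)]
--             result_path_list.append('.' + corresponding_return)
--
--         elif path_list[i] != '<':
--             count = 0
--             result_path_list.append(path_list[i])
--             history.append(path_list[i])
--
--     return result_path_list
-- ===== SOURCE B (Python) =====
-- def replace_return(path_list):
--     """Flat single pass with an explicit stack and a 'previous token was a return' flag."""
--     result = []
--     stack = []
--     prev_ret = False
--     for tok in path_list:
--         if tok != '<':
--             stack.append(tok)
--             result.append(tok)
--             prev_ret = False
--         else:
--             stack.pop()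
--             cur = stack[-1]
--             if prev_ret:
--                 result[-1] = '.' + cur
--             else:
--                 result.append('.' + cur)
--             prev_ret = True
--     return result
-- ===== Notes on version B (the rewrite author's own statement) =====
-- stated objective: simpler
-- what changed: Replaces A's inner while-loop that counts each run of '<' plus the negative-index lookup and slice rebuild of the history list by a single flat pass with an explicit stack (pop then read top) and a 'previous token was a return' flag that overwrites the last output to collapse consecutive returns.
import Mathlib
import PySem

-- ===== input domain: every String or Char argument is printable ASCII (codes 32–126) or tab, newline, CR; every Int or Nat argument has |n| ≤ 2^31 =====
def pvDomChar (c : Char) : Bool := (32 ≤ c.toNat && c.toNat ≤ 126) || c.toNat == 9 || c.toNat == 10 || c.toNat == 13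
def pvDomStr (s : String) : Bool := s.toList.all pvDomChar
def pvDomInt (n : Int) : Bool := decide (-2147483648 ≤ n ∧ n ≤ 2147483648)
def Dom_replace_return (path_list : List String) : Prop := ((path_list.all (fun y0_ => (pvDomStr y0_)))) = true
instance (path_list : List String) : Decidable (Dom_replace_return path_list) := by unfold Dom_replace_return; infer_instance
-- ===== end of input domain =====

-- B replaces A's inner run-counting while-loop and history-slice rebuild by one flat pass with an
-- explicit stack and a 'previous token was a return' flag (objective: simpler decomposition).

-- ===== PORT A =====
-- while ((i + count < l) and (path_list[i + count] == '<')): count += 1   (counts the leading run of '<' of the suffix)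
def runLenA : List String → Nat
  | [] => 0
  | t :: ts => if t == "<" then runLenA ts + 1 else 0

-- the for-loop over i in range(l), as structural recursion on the remaining suffix with the same state
def goA : List String → Nat → List String → List String → List String
  | [], _, res, _ => res
  | t :: ts, count, res, hist =>
    if t == "<" && count == 0 then
      let k := runLenA (t :: ts)
      let corr := PySem.List.pyGetD hist (-((k : Int) + 1)) ""   -- history[-(count+1)]; Pre_ excludes the IndexError
      let hist' := PySem.List.slice hist none (some (-(k : Int)))  -- history[:-count]
      goA ts k (res ++ ["." ++ corr]) hist'
    else if t != "<" then
      goA ts 0 (res ++ [t]) (hist ++ [t])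
    else
      goA ts count res hist

def replace_return (path_list : List String) : List String :=
  goA path_list 0 [] []

-- ===== PORT B =====
def goB : List String → List String → List String → Bool → List String
  | [], res, _, _ => res
  | t :: ts, res, stack, prev =>
    if t != "<" then goB ts (res ++ [t]) (stack ++ [t]) false
    else
      let stack' := stack.dropLast                                -- stack.pop(); Pre_ excludes the IndexError
      let cur := PySem.List.pyGetD stack' (-1) ""                 -- stack[-1]; Pre_ excludes the IndexError
      if prev then goB ts (res.dropLast ++ ["." ++ cur]) stack' true
      else goB ts (res ++ ["." ++ cur]) stack' true

def replace_return_alt (path_list : List String) : List String :=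
  goB path_list [] [] false

-- ===== PRECONDITION & SPEC =====
-- Pre_ excludes exactly the inputs where both Pythons raise IndexError: a run of k consecutive '<'
-- needs at least k+1 earlier un-popped articles; equivalently, before every '<' the number of
-- non-'<' tokens must exceed the number of '<' tokens by at least 2.
def Pre_replace_return (path_list : List String) : Prop :=
  ∀ j, j < path_list.length → path_list.getD j "" = "<" →
    (path_list.take j).countP (· != "<") ≥ (path_list.take j).countP (· == "<") + 2
instance (path_list : List String) : Decidable (Pre_replace_return path_list) := by
  unfold Pre_replace_return; infer_instance

def pvWitness_replace_return : List String := ["a", "b", "<", "c", "<"]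

def Spec_replace_return (path_list : List String) (out : List String) : Prop := out = replace_return_alt path_list
instance (path_list : List String) (out : List String) : Decidable (Spec_replace_return path_list out) := by unfold Spec_replace_return; infer_instance

-- ===== CLAIM (what is proved, stated in full; the proofs are below) =====
def Claim_equal_replace_return : Prop := ∀ (path_list : List String), Dom_replace_return path_list → Pre_replace_return path_list → Spec_replace_return path_list (replace_return path_list)

-- ===== LEMMAS AND PROOFS =====

-- the depth invariant carried through the induction: for each '<' in the suffix ts, the stack built so
-- far (length h) together with the net pushes before that '<' leaves at least 2 elements
def OKdepth (h : Nat) (ts : List String) : Prop :=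
  ∀ j, j < ts.length → ts.getD j "" = "<" →
    h + (ts.take j).countP (· != "<") ≥ (ts.take j).countP (· == "<") + 2

theorem runLenA_replicate (k : Nat) (rest : List String) (h : rest.head? ≠ some "<") :
    runLenA (List.replicate k "<" ++ rest) = k := by
  induction k with
  | zero =>
    simp only [List.replicate, List.nil_append]
    cases rest with
    | nil => rfl
    | cons t ts =>
      simp only [List.head?] at h
      simp only [runLenA]
      have : (t == "<") = false := by
        cases hb : t == "<" with
        | false => rfl
        | true => exact absurd (by rw [eq_of_beq hb]) h
      simp [this]
  | succ k ih => simp [List.replicate_succ, runLenA, ih]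

theorem runLenA_decomp (ts : List String) :
    ts = List.replicate (runLenA ts) "<" ++ ts.drop (runLenA ts) ∧
      (ts.drop (runLenA ts)).head? ≠ some "<" := by
  induction ts with
  | nil => simp [runLenA]
  | cons t ts ih =>
    by_cases h : t = "<"
    · subst h
      simp only [runLenA, beq_self_eq_true, if_true]
      constructor
      · simpa [List.replicate_succ] using ih.1
      · simpa using ih.2
    · have hb : (t == "<") = false := beq_eq_false_iff_ne.mpr h
      simp [runLenA, hb, h]

theorem goA_skip (m : Nat) (rest : List String) (c : Nat) (hc : c ≠ 0)
    (res hist : List String) :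
    goA (List.replicate m "<" ++ rest) c res hist = goA rest c res hist := by
  induction m with
  | zero => simp
  | succ m ih =>
    simp only [List.replicate_succ, List.cons_append, goA]
    have h1 : (("<" : String) == "<" && c == 0) = false := by simp [hc]
    have h2 : (("<" : String) != "<") = false := by simp
    simp only [h1, h2, Bool.false_eq_true, if_false]
    exact ih

theorem goA_count_irrel (rest : List String) (h : rest.head? ≠ some "<")
    (c : Nat) (res hist : List String) :
    goA rest c res hist = goA rest 0 res hist := by
  cases rest with
  | nil => rfl
  | cons t ts =>
    simp only [List.head?] at h
    have hne : t ≠ "<" := fun hh => h (by rw [hh])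
    simp [goA, hne]

theorem goB_exit (rest : List String) (h : rest.head? ≠ some "<")
    (res st : List String) :
    goB rest res st true = goB rest res st false := by
  cases rest with
  | nil => rfl
  | cons t ts =>
    simp only [List.head?] at h
    have hne : t ≠ "<" := fun hh => h (by rw [hh])
    simp [goB, hne]

theorem curStep (st : List String) (h : 2 ≤ st.length) :
    PySem.List.pyGetD st.dropLast (-1) "" = st.getD (st.length - 2) "" := by
  have hne : st.dropLast ≠ [] := by
    have := st.length_dropLast; intro hh; rw [hh] at this; simp at this; omega
  rw [PySem.List.pyGetD_neg_one st.dropLast "" hne, List.getLast_eq_getElem,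
    List.getD_eq_getElem _ _ (by omega)]
  rw [List.getElem_dropLast]
  congr 1
  simp only [List.length_dropLast]
  omega

-- one reduction step of goB on a '<' token
theorem goB_step (ts res st : List String) (prev : Bool) :
    goB ("<" :: ts) res st prev
      = if prev then goB ts (res.dropLast ++ ["." ++ PySem.List.pyGetD st.dropLast (-1) ""]) st.dropLast true
        else goB ts (res ++ ["." ++ PySem.List.pyGetD st.dropLast (-1) ""]) st.dropLast true := by
  simp [goB]

theorem lemA (k : Nat) (hk : 1 ≤ k) (rest : List String) (hrest : rest.head? ≠ some "<")
    (res hist : List String) (hlen : k + 1 ≤ hist.length) :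
    goA (List.replicate k "<" ++ rest) 0 res hist
      = goA rest 0 (res ++ ["." ++ hist.getD (hist.length - (k + 1)) ""])
          (hist.take (hist.length - k)) := by
  obtain ⟨m, rfl⟩ : ∃ m, k = m + 1 := ⟨k - 1, by omega⟩
  rw [List.replicate_succ, List.cons_append]
  simp only [goA, beq_self_eq_true, Bool.and_self, if_true]
  rw [show ("<" :: (List.replicate m "<" ++ rest)) = List.replicate (m + 1) "<" ++ rest by
        rw [List.replicate_succ, List.cons_append]]
  rw [runLenA_replicate (m + 1) rest hrest]
  have hcorr : PySem.List.pyGetD hist (-(((m + 1 : Nat) : Int) + 1)) ""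
      = hist.getD (hist.length - (m + 1 + 1)) "" := by
    rw [show (-(((m + 1 : Nat) : Int) + 1)) = -((m + 2 : Nat) : Int) by push_cast; ring]
    rw [PySem.List.pyGetD_neg_natCast hist (m + 2) "" (by omega) (by omega)]
    rw [List.getD_eq_getElem _ _ (by omega)]
  have hslice : PySem.List.slice hist none (some (-((m + 1 : Nat) : Int)))
      = hist.take (hist.length - (m + 1)) :=
    PySem.List.slice_to_neg_natCast hist (m + 1) (by omega)
  rw [hcorr, hslice, goA_skip m rest (m + 1) (by omega),
    goA_count_irrel rest hrest]

theorem lemB' (m : Nat) : ∀ (rest res : List String) (y : String) (st : List String),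
    1 ≤ m → m + 1 ≤ st.length →
    goB (List.replicate m "<" ++ rest) (res ++ [y]) st true
      = goB rest (res ++ ["." ++ st.getD (st.length - (m + 1)) ""])
          (st.take (st.length - m)) true := by
  induction m with
  | zero => intro _ _ _ _ hm; omega
  | succ m ih =>
    intro rest res y st _ hlen
    rw [List.replicate_succ, List.cons_append, goB_step, if_pos rfl,
      List.dropLast_concat, curStep st (by omega)]
    rcases Nat.eq_zero_or_pos m with hm | hm
    · subst hm
      simp only [List.replicate, List.nil_append]
      rw [List.dropLast_eq_take]
    · rw [ih rest res _ st.dropLast hm (by simp; omega)]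
      simp only [List.length_dropLast]
      rw [show st.length - 1 - (m + 1) = st.length - (m + 1 + 1) from by omega,
        show st.length - 1 - m = st.length - (m + 1) from by omega]
      have e1 : st.dropLast.getD (st.length - (m + 1 + 1)) ""
          = st.getD (st.length - (m + 1 + 1)) "" := by
        rw [List.getD_eq_getElem _ _ (by simp; omega),
          List.getD_eq_getElem _ _ (by omega)]
        simp [List.getElem_dropLast]
      have e2 : List.take (st.length - (m + 1)) st.dropLast
          = List.take (st.length - (m + 1)) st := by
        rw [List.dropLast_eq_take, List.take_take]
        congr 1
        omega
      rw [e1, e2]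

theorem lemB (k : Nat) (hk : 1 ≤ k) (rest : List String) (res st : List String)
    (hlen : k + 1 ≤ st.length) :
    goB (List.replicate k "<" ++ rest) res st false
      = goB rest (res ++ ["." ++ st.getD (st.length - (k + 1)) ""])
          (st.take (st.length - k)) true := by
  obtain ⟨m, rfl⟩ : ∃ m, k = m + 1 := ⟨k - 1, by omega⟩
  rw [List.replicate_succ, List.cons_append, goB_step, if_neg (by simp),
    curStep st (by omega)]
  rcases Nat.eq_zero_or_pos m with hm | hm
  · subst hm
    simp only [List.replicate, List.nil_append]
    rw [List.dropLast_eq_take]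
  · rw [lemB' m rest res _ st.dropLast hm (by simp; omega)]
    simp only [List.length_dropLast]
    rw [show st.length - 1 - (m + 1) = st.length - (m + 1 + 1) from by omega,
      show st.length - 1 - m = st.length - (m + 1) from by omega]
    have e1 : st.dropLast.getD (st.length - (m + 1 + 1)) ""
        = st.getD (st.length - (m + 1 + 1)) "" := by
      rw [List.getD_eq_getElem _ _ (by simp; omega),
        List.getD_eq_getElem _ _ (by omega)]
      simp [List.getElem_dropLast]
    have e2 : List.take (st.length - (m + 1)) st.dropLast
        = List.take (st.length - (m + 1)) st := by
      rw [List.dropLast_eq_take, List.take_take]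
      congr 1
      omega
    rw [e1, e2]

theorem okdepth_cons (t : String) (h : Nat) (ts : List String) (ht : t ≠ "<")
    (hOK : OKdepth h (t :: ts)) : OKdepth (h + 1) ts := by
  intro j hj hg
  have := hOK (j + 1) (by simpa) (by simpa using hg)
  simp only [List.take_succ_cons, List.countP_cons] at this
  have hb : (t == "<") = false := beq_eq_false_iff_ne.mpr ht
  simp [hb, ht] at this
  omega

theorem okdepth_drop (k h : Nat) (rest : List String) (hk : k ≤ h)
    (hOK : OKdepth h (List.replicate k "<" ++ rest)) : OKdepth (h - k) rest := by
  intro j hj hg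
  have hlen : (List.replicate k "<" ++ rest).length = k + rest.length := by simp
  have hget : (List.replicate k "<" ++ rest).getD (k + j) "" = "<" := by
    rw [List.getD_eq_getElem _ _ (by simp; omega)]
    rw [List.getElem_append_right (by simp)]
    rw [← List.getD_eq_getElem _ "" (by simp; omega)]
    simpa using hg
  have := hOK (k + j) (by omega) hget
  rw [List.take_append] at this
  simp only [List.length_replicate, Nat.add_sub_cancel_left] at this
  simp [List.countP_append, List.countP_replicate] at this
  omega

theorem okdepth_run (k h : Nat) (rest : List String) (hk : 1 ≤ k)
    (hOK : OKdepth h (List.replicate k "<" ++ rest)) : k + 1 ≤ h := by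
  have hget : (List.replicate k "<" ++ rest).getD (k - 1) "" = "<" := by
    rw [List.getD_eq_getElem _ _ (by simp; omega)]
    rw [List.getElem_append_left (by simp; omega)]
    simp
  have := hOK (k - 1) (by simp; omega) hget
  rw [List.take_append] at this
  simp only [List.length_replicate, show k - 1 - k = 0 by omega, List.take_zero,
    List.append_nil, List.take_replicate] at this
  simp [List.countP_replicate] at this
  omega

theorem main_equiv (n : Nat) : ∀ ts : List String, ts.length ≤ n → ∀ res hist : List String,
    OKdepth hist.length ts → goA ts 0 res hist = goB ts res hist false := by
  induction n with
  | zero =>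
    intro ts hts _ _ _
    have hnil : ts = [] := List.length_eq_zero_iff.mp (by omega)
    subst hnil; rfl
  | succ n ih =>
    intro ts hts res hist hOK
    cases hcons : ts with
    | nil => rfl
    | cons t ts' =>
      subst hcons
      by_cases ht : t = "<"
      · subst ht
        obtain ⟨hdec, hhead⟩ := runLenA_decomp ("<" :: ts')
        set k := runLenA ("<" :: ts') with hkdef
        have hk1 : 1 ≤ k := by rw [hkdef]; simp [runLenA]
        set rest := ("<" :: ts').drop k with hrest
        rw [hdec] at hOK ⊢
        have hdepth : k + 1 ≤ hist.length := okdepth_run k hist.length rest hk1 hOK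
        rw [lemA k hk1 rest hhead res hist hdepth,
          lemB k hk1 rest res hist hdepth,
          goB_exit rest hhead]
        have hlen' : (hist.take (hist.length - k)).length = hist.length - k := by
          simp
        apply ih
        · have : ("<" :: ts').length = k + rest.length := by rw [hdec]; simp
          simp at this hts
          omega
        · rw [hlen']
          exact okdepth_drop k hist.length rest (by omega) hOK
      · have hb : (t == "<") = false := beq_eq_false_iff_ne.mpr ht
        simp only [goA, goB, hb, Bool.false_and, Bool.false_eq_true, if_false,
          bne, Bool.not_false, if_true]
        have : (hist ++ [t]).length = hist.length + 1 := by simp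
        rw [show (0 : Nat) = 0 by rfl]
        have hOK' := okdepth_cons t hist.length ts' ht hOK
        rw [← this] at hOK'
        exact ih ts' (by simpa using hts) (res ++ [t]) (hist ++ [t]) hOK'

theorem pre_okdepth (p : List String) (h : Pre_replace_return p) : OKdepth 0 p := by
  intro j hj hg
  simpa using h j hj hg

-- ===== VERDICT (by name: the statement is the Claim_ definition above) =====
theorem replace_return_spec : Claim_equal_replace_return := by
  intro p _ hpre
  unfold Spec_replace_return replace_return replace_return_alt
  exact main_equiv p.length p le_rfl [] [] (by simpa using pre_okdepth p hpre)
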